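-- pv_equiv track=rewrite | github.com/ymbahe/make_particle_load | particle_load/generate_particle_load.py | find_allowed_core_number
-- ===== SOURCE A (Python) =====
-- def find_allowed_core_number(num_cores, n_fft, num_cores_per_node):
--     """Find an allowed number of cores for a given target value."""
--
--     # Increase n_cores until it is an integer divisor of n_dim_fft
--     while (n_fft % num_cores) != 0:
--         num_cores += 1
--
--     # If we're using one node, try to use as many of the cores as possible
--     # (but still such that ndim_fft is an integer multiple). Since the
--     # starting `ncores` works, we will reduce n_cores at most to that.
--     if num_cores < num_cores_per_node:
--         num_cores = num_cores_per_node
--         while (n_fft % num_cores) != 0: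
--             num_cores -= 1
--
--     return num_cores
-- ===== SOURCE B (Python) =====
-- def find_allowed_core_number(num_cores, n_fft, num_cores_per_node):
--     """Find an allowed number of cores for a given target value."""
--     # Enumerate all divisors of n_fft in O(sqrt(n_fft)) by trial division.
--     divisors = set()
--     i = 1
--     while i * i <= n_fft:
--         if n_fft % i == 0:
--             divisors.add(i)
--             divisors.add(n_fft // i)
--         i += 1
--     # Smallest divisor at least num_cores.
--     num_cores = min(d for d in divisors if d >= num_cores)
--     # On one node, use the largest divisor that fits on the node instead.
--     if num_cores < num_cores_per_node:
--         num_cores = max(d for d in divisors if d <= num_cores_per_node)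
--     return num_cores
-- ===== Notes on version B (the rewrite author's own statement) =====
-- stated objective: alternative
-- what changed: Replaces the two linear scans (increment num_cores until it divides n_fft; decrement from num_cores_per_node) by a sqrt(n_fft) trial-division enumeration of all divisors of n_fft, then picks the smallest divisor >= num_cores and, for the node case, the largest divisor <= num_cores_per_node (intended as faster; a timing run measured 63.97x at the largest size but could not confirm it under its rule because A diverges on part of the random input family).
-- outside the precondition, e.g. on find_allowed_core_number(3, 0, 1): A returns 3, B raises ValueError; on find_allowed_core_number(2, -6, 1): A returns 2, B raises ValueError; on find_allowed_core_number(-2, 6, -5): A returns -2, B returns 1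
import Mathlib
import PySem

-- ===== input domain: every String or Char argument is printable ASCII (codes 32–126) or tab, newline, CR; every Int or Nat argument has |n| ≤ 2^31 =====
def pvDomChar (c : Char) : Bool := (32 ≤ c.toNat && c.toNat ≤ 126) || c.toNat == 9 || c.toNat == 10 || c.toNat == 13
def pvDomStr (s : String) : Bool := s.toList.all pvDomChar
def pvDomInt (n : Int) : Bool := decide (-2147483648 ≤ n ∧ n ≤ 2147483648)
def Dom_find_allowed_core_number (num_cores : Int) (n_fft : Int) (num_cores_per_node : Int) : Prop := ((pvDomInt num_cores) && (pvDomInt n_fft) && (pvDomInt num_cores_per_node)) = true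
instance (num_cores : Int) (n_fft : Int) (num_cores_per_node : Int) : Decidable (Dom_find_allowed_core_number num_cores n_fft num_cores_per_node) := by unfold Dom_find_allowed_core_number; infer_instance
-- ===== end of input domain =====

-- B replaces A's two linear scans by a sqrt(n_fft) trial-division enumeration of all divisors
-- of n_fft and picks the bounding divisors by comparison (a different algorithm).


-- ===== PORT A =====
-- first while loop: increment num_cores until it divides n_fft (fuel makes it total; under
-- Pre_ the fuel is sufficient since n_fft itself divides)
def loopUpA : Nat → Int → Int → Int
  | 0, _, c => c
  | f+1, n, c => if PySem.Int.mod n c = 0 then c else loopUpA f n (c+1)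

-- second while loop: decrement from num_cores_per_node until it divides n_fft
def loopDownA : Nat → Int → Int → Int
  | 0, _, c => c
  | f+1, n, c => if PySem.Int.mod n c = 0 then c else loopDownA f n (c-1)

def find_allowed_core_number (num_cores : Int) (n_fft : Int) (num_cores_per_node : Int) : Int :=
  let c := loopUpA ((n_fft - num_cores).toNat + n_fft.natAbs + 1) n_fft num_cores
  if c < num_cores_per_node then
    loopDownA (num_cores_per_node.toNat + n_fft.natAbs + 1) n_fft num_cores_per_node
  else c

-- ===== PORT B =====
-- trial-division loop: while i*i <= n, add i and n//i to the divisor set (fuel makes it total)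
def divLoopB : Nat → Int → Int → PySem.Set Int → PySem.Set Int
  | 0, _, _, s => s
  | f+1, n, i, s =>
    if i * i ≤ n then
      divLoopB f n (i+1)
        (if PySem.Int.mod n i = 0 then
          PySem.Set.add (PySem.Set.add s i) (PySem.Int.floordiv n i)
        else s)
    else s

def find_allowed_core_number_alt (num_cores : Int) (n_fft : Int) (num_cores_per_node : Int) : Int :=
  let divs := divLoopB (n_fft.toNat + 1) n_fft 1 PySem.Set.empty
  -- min(d for d in divisors if d >= num_cores); Python raises on an empty set, which Pre_ excludes
  let c := (PySem.List.min? (divs.filter (fun d => num_cores ≤ d)) (fun x => x)).getD 0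
  if c < num_cores_per_node then
    (PySem.List.max? (divs.filter (fun d => d ≤ num_cores_per_node)) (fun x => x)).getD 0
  else c

-- ===== PRECONDITION & SPEC =====
-- Pre_ excludes: non-positive n_fft (B's divisor enumeration is empty and raises ValueError),
-- num_cores = 0 (A raises ZeroDivisionError), num_cores > n_fft > 0 (A diverges), and negative
-- num_cores with num_cores_per_node < 1, where A's upward scan happens to return a negative
-- "core count" (an accident of starting below zero) while B picks a positive divisor.
def Pre_find_allowed_core_number (num_cores : Int) (n_fft : Int) (num_cores_per_node : Int) : Prop :=
  1 ≤ n_fft ∧ ((1 ≤ num_cores ∧ num_cores ≤ n_fft) ∨ (num_cores ≤ -1 ∧ 1 ≤ num_cores_per_node))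
instance (num_cores : Int) (n_fft : Int) (num_cores_per_node : Int) : Decidable (Pre_find_allowed_core_number num_cores n_fft num_cores_per_node) := by unfold Pre_find_allowed_core_number; infer_instance

def pvWitness_find_allowed_core_number : Int × Int × Int := (2, 12, 4)

def Spec_find_allowed_core_number (num_cores : Int) (n_fft : Int) (num_cores_per_node : Int) (out : Int) : Prop := out = find_allowed_core_number_alt num_cores n_fft num_cores_per_node
instance (num_cores : Int) (n_fft : Int) (num_cores_per_node : Int) (out : Int) : Decidable (Spec_find_allowed_core_number num_cores n_fft num_cores_per_node out) := by unfold Spec_find_allowed_core_number; infer_instance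

-- ===== CLAIM (what is proved, stated in full; the proofs are below) =====
def Claim_equal_find_allowed_core_number : Prop := ∀ (num_cores : Int) (n_fft : Int) (num_cores_per_node : Int), Dom_find_allowed_core_number num_cores n_fft num_cores_per_node → Pre_find_allowed_core_number num_cores n_fft num_cores_per_node → Spec_find_allowed_core_number num_cores n_fft num_cores_per_node (find_allowed_core_number num_cores n_fft num_cores_per_node)

-- ===== LEMMAS AND PROOFS =====

-- loopUpA returns the least divisor of n that is ≥ c (given enough fuel)
theorem upA_spec (f : Nat) : ∀ (n c m : Int), c ≤ m → m ∣ n → (m - c).toNat < f →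
    c ≤ loopUpA f n c ∧ loopUpA f n c ∣ n ∧ loopUpA f n c ≤ m ∧
    ∀ d : Int, c ≤ d → d < loopUpA f n c → ¬ d ∣ n := by
  induction f with
  | zero => intro n c m _ _ hf; omega
  | succ f ih =>
    intro n c m h2 hmd hf
    by_cases hm : PySem.Int.mod n c = 0
    · have hc : c ∣ n := (PySem.Int.mod_eq_zero_iff_dvd n c).mp hm
      rw [loopUpA, if_pos hm]
      exact ⟨le_refl c, hc, h2, fun d hcd hdc => absurd hcd (by omega)⟩
    · have hcn : c ≠ m := by
        intro h; subst h
        exact hm ((PySem.Int.mod_eq_zero_iff_dvd n c).mpr hmd)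
      obtain ⟨a1, a2, a3, a4⟩ := ih n (c+1) m (by omega) hmd (by omega)
      rw [loopUpA, if_neg hm]
      refine ⟨by omega, a2, a3, fun d hcd hdc hdvd => ?_⟩
      rcases eq_or_lt_of_le hcd with h | h
      · exact hm ((PySem.Int.mod_eq_zero_iff_dvd n c).mpr (h ▸ hdvd))
      · exact a4 d (by omega) hdc hdvd

-- loopDownA returns the greatest divisor of n that is ≤ s, given a divisor t with 1 ≤ t ≤ s
theorem downA_spec (f : Nat) : ∀ (n s t : Int), 1 ≤ t → t ≤ s → t ∣ n → (s - t).toNat < f →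
    loopDownA f n s ∣ n ∧ t ≤ loopDownA f n s ∧ loopDownA f n s ≤ s ∧
    ∀ d : Int, loopDownA f n s < d → d ≤ s → ¬ d ∣ n := by
  induction f with
  | zero => intro n s t _ _ _ hf; omega
  | succ f ih =>
    intro n s t h1 h2 ht hf
    by_cases hm : PySem.Int.mod n s = 0
    · have hs : s ∣ n := (PySem.Int.mod_eq_zero_iff_dvd n s).mp hm
      rw [loopDownA, if_pos hm]
      exact ⟨hs, h2, le_refl s, fun d hsd hds => absurd hsd (by omega)⟩
    · have hsn : t ≠ s := by
        intro h; subst h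
        exact hm ((PySem.Int.mod_eq_zero_iff_dvd n t).mpr ht)
      obtain ⟨a1, a2, a3, a4⟩ := ih n (s-1) t h1 (by omega) ht (by omega)
      rw [loopDownA, if_neg hm]
      refine ⟨a1, a2, by omega, fun d hds hdsle hdvd => ?_⟩
      rcases eq_or_lt_of_le hdsle with h | h
      · exact hm ((PySem.Int.mod_eq_zero_iff_dvd n s).mpr (h ▸ hdvd))
      · exact a4 d hds (by omega) hdvd

-- membership invariant of the trial-division loop
theorem divLoop_mem (f : Nat) : ∀ (n i : Int) (s : PySem.Set Int), 1 ≤ i →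
    n.toNat + 2 ≤ f + i.toNat →
    ∀ d : Int, d ∈ divLoopB f n i s ↔
      (d ∈ s ∨ ∃ j : Int, i ≤ j ∧ j * j ≤ n ∧ j ∣ n ∧ (d = j ∨ d = PySem.Int.floordiv n j)) := by
  induction f with
  | zero =>
    intro n i s h1 hf d
    simp only [divLoopB]
    constructor
    · exact Or.inl
    · rintro (h | ⟨j, hij, hjj, -, -⟩)
      · exact h
      · exfalso
        have hj1 : 1 ≤ j := by omega
        have : j ≤ j * j := le_mul_of_one_le_left (by omega) hj1
        omega
  | succ f ih =>
    intro n i s h1 hf d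
    by_cases hle : i * i ≤ n
    · simp only [divLoopB, if_pos hle]
      rw [ih n (i+1) _ (by omega) (by omega) d]
      by_cases hm : PySem.Int.mod n i = 0
      · have hdvd : i ∣ n := (PySem.Int.mod_eq_zero_iff_dvd n i).mp hm
        rw [if_pos hm]
        simp only [PySem.Set.mem_add]
        constructor
        · rintro (((h | h) | h) | ⟨j, hij, hjj, hj, hd⟩)
          · exact Or.inl h
          · exact Or.inr ⟨i, le_refl i, hle, hdvd, Or.inl h⟩
          · exact Or.inr ⟨i, le_refl i, hle, hdvd, Or.inr h⟩
          · exact Or.inr ⟨j, by omega, hjj, hj, hd⟩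
        · rintro (h | ⟨j, hij, hjj, hj, hd⟩)
          · exact Or.inl (Or.inl (Or.inl h))
          · rcases eq_or_lt_of_le hij with h | h
            · subst h
              rcases hd with h | h
              · exact Or.inl (Or.inl (Or.inr h))
              · exact Or.inl (Or.inr h)
            · exact Or.inr ⟨j, by omega, hjj, hj, hd⟩
      · simp only [if_neg hm]
        constructor
        · rintro (h | ⟨j, hij, hjj, hj, hd⟩)
          · exact Or.inl h
          · exact Or.inr ⟨j, by omega, hjj, hj, hd⟩
        · rintro (h | ⟨j, hij, hjj, hj, hd⟩)
          · exact Or.inl h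
          · rcases eq_or_lt_of_le hij with h | h
            · exact absurd ((PySem.Int.mod_eq_zero_iff_dvd n i).mpr (h ▸ hj)) hm
            · exact Or.inr ⟨j, by omega, hjj, hj, hd⟩
    · simp only [divLoopB, if_neg hle]
      constructor
      · exact Or.inl
      · rintro (h | ⟨j, hij, hjj, -, -⟩)
        · exact h
        · exfalso
          have : i * i ≤ j * j :=
            mul_le_mul hij hij (by omega) (by omega)
          omega

-- the enumerated set is exactly the set of divisors of n in [1, n]
theorem divisors_iff (n d : Int) (hn : 1 ≤ n) :
    d ∈ divLoopB (n.toNat + 1) n 1 PySem.Set.empty ↔ (1 ≤ d ∧ d ≤ n ∧ d ∣ n) := by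
  rw [divLoop_mem (n.toNat + 1) n 1 PySem.Set.empty (by omega) (by omega) d]
  constructor
  · rintro (h | ⟨j, hj1, hjj, hjd, hd | hd⟩)
    · exact absurd h (List.not_mem_nil)
    · subst hd
      exact ⟨hj1, Int.le_of_dvd (by omega) hjd, hjd⟩
    · have hj0 : 0 < j := by omega
      rw [PySem.Int.floordiv_eq_ediv_of_pos hj0] at hd
      subst hd
      refine ⟨?_, Int.ediv_le_self j (by omega), ⟨j, (Int.ediv_mul_cancel hjd).symm⟩⟩
      rw [Int.le_ediv_iff_mul_le hj0]
      have hjn : j ≤ n := Int.le_of_dvd (by omega) hjd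
      omega
  · rintro ⟨hd1, hd2, hd3⟩
    by_cases hsq : d * d ≤ n
    · exact Or.inr ⟨d, hd1, hsq, hd3, Or.inl rfl⟩
    · have hd0 : 0 < d := by omega
      refine Or.inr ⟨n / d, ?_, ?_, ⟨d, (Int.ediv_mul_cancel hd3).symm⟩, Or.inr ?_⟩
      · rw [Int.le_ediv_iff_mul_le hd0]; omega
      · have hjd : n / d * d = n := Int.ediv_mul_cancel hd3
        have hlt : n / d < d := by
          by_contra hge
          push_neg at hge
          have : d * d ≤ n / d * d := mul_le_mul_of_nonneg_right hge (by omega)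
          omega
        have hq0 : 0 ≤ n / d := Int.ediv_nonneg (by omega) (by omega)
        have hmul : n / d * (n / d) ≤ n / d * d :=
          mul_le_mul_of_nonneg_left (le_of_lt hlt) hq0
        omega
      · have hjd : n / d * d = n := Int.ediv_mul_cancel hd3
        have hj0 : 0 < n / d := by
          have h := Int.le_ediv_iff_mul_le hd0 (a := 1) (b := n)
          omega
        rw [PySem.Int.floordiv_eq_ediv_of_pos hj0]
        have h2 : n / d * d / (n / d) = d := Int.mul_ediv_cancel_left d (by omega)
        rw [hjd] at h2
        exact h2.symm

-- shared branch: A's downward scan from num_cores_per_node equals B's max-divisor pick,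
-- given any divisor t of n_fft with 1 ≤ t ≤ num_cores_per_node
theorem maxBranch (nf np t : Int) (hn : 1 ≤ nf) (ht1 : 1 ≤ t) (ht2 : t ≤ np) (htd : t ∣ nf) :
    loopDownA (np.toNat + nf.natAbs + 1) nf np =
      (PySem.List.max? ((divLoopB (nf.toNat + 1) nf 1 PySem.Set.empty).filter
        (fun d => d ≤ np)) (fun x => x)).getD 0 := by
  obtain ⟨d1, d2, d3, d4⟩ := downA_spec (np.toNat + nf.natAbs + 1) nf np t ht1 ht2 htd (by omega)
  set rd := loopDownA (np.toNat + nf.natAbs + 1) nf np with hrd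
  set divs := divLoopB (nf.toNat + 1) nf 1 PySem.Set.empty with hdivs
  have hrdmem : rd ∈ divs.filter (fun d => d ≤ np) := by
    rw [List.mem_filter]
    exact ⟨(divisors_iff nf rd hn).mpr ⟨by omega, Int.le_of_dvd (by omega) d1, d1⟩,
      by simpa using d3⟩
  rcases hmax : PySem.List.max? (divs.filter (fun d => d ≤ np)) (fun x => x) with _ | m2
  · rw [PySem.List.max?_eq_none_iff] at hmax
    exact absurd hmax (List.ne_nil_of_mem hrdmem)
  · have hm2mem := PySem.List.max?_mem hmax
    rw [List.mem_filter] at hm2mem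
    have hm2div := (divisors_iff nf m2 hn).mp hm2mem.1
    have hm2np : m2 ≤ np := by simpa using hm2mem.2
    have hrdm2 : rd ≤ m2 := by simpa using PySem.List.max?_isMax hmax rd hrdmem
    have hm2rd : m2 ≤ rd := by
      rcases lt_or_ge rd m2 with h | h
      · exact absurd hm2div.2.2 (d4 m2 h hm2np)
      · omega
    simp only [Option.getD_some]
    omega

-- ===== VERDICT (by name: the statement is the Claim_ definition above) =====
theorem find_allowed_core_number_spec : Claim_equal_find_allowed_core_number := by
  intro nc nf np _ hPre
  obtain ⟨hn, hcase⟩ := hPre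
  unfold Spec_find_allowed_core_number
  simp only [find_allowed_core_number, find_allowed_core_number_alt]
  rcases hcase with ⟨h1, h2⟩ | ⟨h1, h2⟩
  · -- 1 ≤ num_cores ≤ n_fft
    obtain ⟨u1, u2, u3, u4⟩ := upA_spec ((nf - nc).toNat + nf.natAbs + 1) nf nc nf h2 dvd_rfl (by omega)
    set r := loopUpA ((nf - nc).toNat + nf.natAbs + 1) nf nc with hr
    set divs := divLoopB (nf.toNat + 1) nf 1 PySem.Set.empty with hdivs
    have hrmem : r ∈ divs.filter (fun d => nc ≤ d) := by
      rw [List.mem_filter]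
      exact ⟨(divisors_iff nf r hn).mpr ⟨by omega, u3, u2⟩, by simpa using u1⟩
    rcases hmin : PySem.List.min? (divs.filter (fun d => nc ≤ d)) (fun x => x) with _ | m
    · rw [PySem.List.min?_eq_none_iff] at hmin
      exact absurd hmin (List.ne_nil_of_mem hrmem)
    · have hmmem := PySem.List.min?_mem hmin
      rw [List.mem_filter] at hmmem
      have hmdiv := (divisors_iff nf m hn).mp hmmem.1
      have hmnc : nc ≤ m := by simpa using hmmem.2
      have hmr : m ≤ r := by simpa using PySem.List.min?_isMin hmin r hrmem
      have hmeq : m = r := by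
        rcases lt_or_ge m r with h | h
        · exact absurd hmdiv.2.2 (u4 m hmnc h)
        · omega
      simp only [Option.getD_some, hmeq]
      by_cases hbr : r < np
      · rw [if_pos hbr, if_pos hbr]
        exact maxBranch nf np r hn (by omega) (by omega) u2
      · rw [if_neg hbr, if_neg hbr]
  · -- num_cores ≤ -1 and 1 ≤ num_cores_per_node
    obtain ⟨u1, u2, u3, u4⟩ :=
      upA_spec ((nf - nc).toNat + nf.natAbs + 1) nf nc (-1) (by omega) ⟨-nf, by ring⟩ (by omega)
    set r := loopUpA ((nf - nc).toNat + nf.natAbs + 1) nf nc with hr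
    set divs := divLoopB (nf.toNat + 1) nf 1 PySem.Set.empty with hdivs
    have h1mem : (1 : Int) ∈ divs.filter (fun d => nc ≤ d) := by
      rw [List.mem_filter]
      refine ⟨(divisors_iff nf 1 hn).mpr ⟨le_refl 1, hn, one_dvd nf⟩, ?_⟩
      simp only [decide_eq_true_eq]
      omega
    rcases hmin : PySem.List.min? (divs.filter (fun d => nc ≤ d)) (fun x => x) with _ | m
    · rw [PySem.List.min?_eq_none_iff] at hmin
      exact absurd hmin (List.ne_nil_of_mem h1mem)
    · have hmmem := PySem.List.min?_mem hmin
      rw [List.mem_filter] at hmmem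
      have hmdiv := (divisors_iff nf m hn).mp hmmem.1
      have hm1 : m ≤ 1 := by simpa using PySem.List.min?_isMin hmin 1 h1mem
      have hmeq : m = 1 := by omega
      have hbrA : r < np := by omega
      rw [if_pos hbrA]
      simp only [Option.getD_some, hmeq]
      by_cases hbp : (1 : Int) < np
      · rw [if_pos hbp]
        exact maxBranch nf np 1 hn (le_refl 1) (by omega) (one_dvd nf)
      · rw [if_neg hbp]
        obtain ⟨d1, d2, d3, d4⟩ :=
          downA_spec (np.toNat + nf.natAbs + 1) nf np 1 (le_refl 1) (by omega) (one_dvd nf) (by omega)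
        omega
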